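-- pv_equiv track=rewrite | github.com/hrecker/AdventOfCode2020 | day24/part2.py | getNormAdjacentTiles
-- ===== SOURCE A (Python) =====
-- import copy
--
-- e = 0
--
-- w = 1
--
-- n = 2
--
-- s = 3
--
-- def normalize(dirCounts):
--     if dirCounts[e] > dirCounts[w]:
--         dirCounts[e] = dirCounts[e] - dirCounts[w]
--         dirCounts[w] = 0
--     else:
--         dirCounts[w] = dirCounts[w] - dirCounts[e]
--         dirCounts[e] = 0
--
--     if dirCounts[n] > dirCounts[s]:
--         dirCounts[n] = dirCounts[n] - dirCounts[s]
--         dirCounts[s] = 0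
--     else:
--         dirCounts[s] = dirCounts[s] - dirCounts[n]
--         dirCounts[n] = 0
--
--     normalized = ""
--     for i in range(dirCounts[e]):
--         normalized += 'e'
--     for i in range(dirCounts[s]):
--         normalized += 's'
--     for i in range(dirCounts[w]):
--         normalized += 'w'
--     for i in range(dirCounts[n]):
--         normalized += 'n'
--     return normalized
--
-- def getDirCounts(normalizedCoord):
--     dirCounts = [0] * 4
--     dirCounts[e] = normalizedCoord.count('e')
--     dirCounts[s] = normalizedCoord.count('s')
--     dirCounts[w] = normalizedCoord.count('w')
--     dirCounts[n] = normalizedCoord.count('n')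
--     return dirCounts
--
-- def getNormAdjacentTiles(normalizedCoord):
--     dirCounts = getDirCounts(normalizedCoord)
--     newDirs = []
--     newDirs.append(copy.deepcopy(dirCounts))
--     newDirs.append(copy.deepcopy(dirCounts))
--     newDirs.append(copy.deepcopy(dirCounts))
--     newDirs.append(copy.deepcopy(dirCounts))
--     newDirs.append(copy.deepcopy(dirCounts))
--     newDirs.append(copy.deepcopy(dirCounts))
--
--     newDirs[0][e] += 2
--
--     newDirs[1][e] += 1
--     newDirs[1][s] += 2
--
--     newDirs[2][w] += 1
--     newDirs[2][s] += 2
--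
--     newDirs[3][w] += 2
--
--     newDirs[4][w] += 1
--     newDirs[4][n] += 2
--
--     newDirs[5][e] += 1
--     newDirs[5][n] += 2
--
--     return [normalize(dirs) for dirs in newDirs]
-- ===== SOURCE B (Python) =====
-- def getNormAdjacentTiles(normalizedCoord):
--     res = []
--     for step in ('ee', 'ess', 'wss', 'ww', 'wnn', 'enn'):
--         t = [c for c in normalizedCoord + step if c in 'eswn']
--         for a, b in (('e', 'w'), ('n', 's')):
--             while a in t and b in t:
--                 t.remove(a)
--                 t.remove(b)
--         res.append(''.join(sorted(t, key='eswn'.find)))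
--     return res
-- ===== Notes on version B (the rewrite author's own statement) =====
-- stated objective: alternative
-- what changed: B never computes direction counts or offsets: each neighbour is the coordinate string with the literal two- or three-character move string appended, normalized symbolically by repeatedly deleting one opposite-direction pair (east/west, then north/south) from the character list and finally stable-sorting the survivors by directional key order, replacing A's four-slot count list, six deepcopies and cancel-then-append-loops arithmetic.
import Mathlib
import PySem

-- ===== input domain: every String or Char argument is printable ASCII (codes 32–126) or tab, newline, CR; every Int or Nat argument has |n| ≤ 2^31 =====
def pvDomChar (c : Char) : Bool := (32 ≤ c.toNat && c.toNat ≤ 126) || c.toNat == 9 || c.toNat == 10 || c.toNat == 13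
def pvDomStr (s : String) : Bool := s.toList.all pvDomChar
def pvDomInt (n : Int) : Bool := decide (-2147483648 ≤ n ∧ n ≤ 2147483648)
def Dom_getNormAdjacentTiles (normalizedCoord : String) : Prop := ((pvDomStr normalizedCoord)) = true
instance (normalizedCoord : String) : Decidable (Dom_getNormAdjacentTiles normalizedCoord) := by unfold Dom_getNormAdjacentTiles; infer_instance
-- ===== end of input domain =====

-- B builds each neighbour by appending the literal move string and normalizing symbolically
-- (repeated deletion of opposite-direction pairs, then a stable key-sort) instead of A's
-- count arithmetic (objective: alternative).

-- ===== PORT A =====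
-- A's dirCounts is a fixed 4-slot list indexed by the module constants e=0, w=1, n=2, s=3;
-- it is ported as a record with one field per slot.
structure PvDirCounts where
  e : Int
  w : Int
  n : Int
  s : Int
deriving Repr, DecidableEq

def pvNormalize (dc : PvDirCounts) : String :=
  let dc1 := if dc.e > dc.w then { dc with e := dc.e - dc.w, w := 0 }
             else { dc with w := dc.w - dc.e, e := 0 }
  let dc2 := if dc1.n > dc1.s then { dc1 with n := dc1.n - dc1.s, s := 0 }
             else { dc1 with s := dc1.s - dc1.n, n := 0 }
  let normalized : List Char := []
  let normalized := (PySem.List.pyRange 0 dc2.e 1).foldl (fun acc _ => acc ++ ['e']) normalized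
  let normalized := (PySem.List.pyRange 0 dc2.s 1).foldl (fun acc _ => acc ++ ['s']) normalized
  let normalized := (PySem.List.pyRange 0 dc2.w 1).foldl (fun acc _ => acc ++ ['w']) normalized
  let normalized := (PySem.List.pyRange 0 dc2.n 1).foldl (fun acc _ => acc ++ ['n']) normalized
  String.ofList normalized

def pvGetDirCounts (normalizedCoord : String) : PvDirCounts :=
  { e := (PySem.Str.count normalizedCoord "e" : Int)
  , s := (PySem.Str.count normalizedCoord "s" : Int)
  , w := (PySem.Str.count normalizedCoord "w" : Int)
  , n := (PySem.Str.count normalizedCoord "n" : Int) }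

def getNormAdjacentTiles (normalizedCoord : String) : List String :=
  let d := pvGetDirCounts normalizedCoord
  let n0 := { d with e := d.e + 2 }
  let n1 := { d with e := d.e + 1, s := d.s + 2 }
  let n2 := { d with w := d.w + 1, s := d.s + 2 }
  let n3 := { d with w := d.w + 2 }
  let n4 := { d with w := d.w + 1, n := d.n + 2 }
  let n5 := { d with e := d.e + 1, n := d.n + 2 }
  [n0, n1, n2, n3, n4, n5].map pvNormalize

-- ===== PORT B =====
-- the sort key 'eswn'.find (find, not index: total, but only applied to chars of 'eswn' here)
def pvKey (c : Char) : Int := PySem.Chars.find ['e', 's', 'w', 'n'] [c]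

-- the inner while-loop: while a in t and b in t: t.remove(a); t.remove(b)
-- (Python list.remove drops the first occurrence = List.erase; membership is guarded, so it never raises)
def pvCancel (a b : Char) (t : List Char) : List Char :=
  if h : a ∈ t ∧ b ∈ t then pvCancel a b ((t.erase a).erase b) else t
termination_by t.length
decreasing_by
  have h1 : (t.erase a).length = t.length - 1 := List.length_erase_of_mem h.1
  have h2 : ((t.erase a).erase b).length ≤ (t.erase a).length := List.length_erase_le
  have h3 : 0 < t.length := List.length_pos_of_mem h.1
  omega

def getNormAdjacentTiles_alt (normalizedCoord : String) : List String :=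
  (["ee", "ess", "wss", "ww", "wnn", "enn"] : List String).map (fun step =>
    let t := (normalizedCoord.toList ++ step.toList).filter
               (fun c => PySem.Chars.isIn [c] ['e', 's', 'w', 'n'])
    let t := ([('e', 'w'), ('n', 's')] : List (Char × Char)).foldl
               (fun t p => pvCancel p.1 p.2 t) t
    String.ofList (PySem.List.sorted t pvKey false))

-- ===== PRECONDITION & SPEC =====
def Spec_getNormAdjacentTiles (normalizedCoord : String) (out : List String) : Prop := out = getNormAdjacentTiles_alt normalizedCoord
instance (normalizedCoord : String) (out : List String) : Decidable (Spec_getNormAdjacentTiles normalizedCoord out) := by unfold Spec_getNormAdjacentTiles; infer_instance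

-- ===== CLAIM (what is proved, stated in full; the proofs are below) =====
def Claim_equal_getNormAdjacentTiles : Prop := ∀ (normalizedCoord : String), Dom_getNormAdjacentTiles normalizedCoord → Spec_getNormAdjacentTiles normalizedCoord (getNormAdjacentTiles normalizedCoord)

-- ===== LEMMAS AND PROOFS =====

-- the canonical normalized string: e's, then s's, then w's, then n's
def pvCanon (ne ns nw nn : Nat) : List Char :=
  List.replicate ne 'e' ++ List.replicate ns 's' ++ List.replicate nw 'w' ++ List.replicate nn 'n'

-- counting a single character with Python's str.count is List.count
theorem pv_count_go_single (c : Char) : ∀ (s : List Char) (fuel acc : Nat), s.length ≤ fuel →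
    PySem.Chars.count.go [c] fuel s acc = acc + s.count c := by
  intro s
  induction s with
  | nil => intro fuel acc _; cases fuel <;> simp [PySem.Chars.count.go]
  | cons y t ih =>
    intro fuel acc hf
    cases fuel with
    | zero => simp at hf
    | succ f =>
      simp only [List.length_cons] at hf
      by_cases hc : c = y
      · subst hc
        simp only [PySem.Chars.count.go, List.isPrefixOf, beq_self_eq_true, Bool.true_and,
          List.isPrefixOf_nil_left, if_true, List.length_singleton, List.drop_one,
          List.tail_cons]
        rw [ih f (acc + 1) (by omega)]
        simp [List.count_cons]
        omega
      · have hb : (c == y) = false := by simp [hc]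
        simp only [PySem.Chars.count.go, List.isPrefixOf, hb, Bool.false_and, if_false]
        rw [ih f acc (by omega)]
        simp [List.count_cons, Ne.symm hc, hc]

theorem pv_count_single (s : List Char) (c : Char) :
    PySem.Chars.count s [c] = s.count c := by
  simp [PySem.Chars.count, pv_count_go_single c s s.length 0 le_rfl]

-- the append-one-char loop body builds a replicate of the loop length
theorem pv_foldl_app {α : Type} (l : List α) (c : Char) (acc : List Char) :
    l.foldl (fun a _ => a ++ [c]) acc = acc ++ List.replicate l.length c := by
  induction l generalizing acc with
  | nil => simp
  | cons h t ih => simp [ih, List.replicate_succ]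

-- A's normalize of nonnegative counts is the canonical string of the truncated differences
theorem pv_norm_canon (ce cw cn cs : Nat) :
    pvNormalize ⟨(ce : Int), (cw : Int), (cn : Int), (cs : Int)⟩ =
      String.ofList (pvCanon (ce - cw) (cs - cn) (cw - ce) (cn - cs)) := by
  unfold pvNormalize pvCanon
  dsimp only
  split_ifs with h1 h2 h2 <;> dsimp only at * <;>
    simp only [pv_foldl_app, PySem.List.length_pyRange_one, List.nil_append, Int.sub_zero]
  · simp [show ((ce:Int) - ↑cw).toNat = ce - cw from by omega,
      show ((cn:Int) - ↑cs).toNat = cn - cs from by omega,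
      show cs - cn = 0 from by omega, show cw - ce = 0 from by omega]
  · simp [show ((ce:Int) - ↑cw).toNat = ce - cw from by omega,
      show ((cs:Int) - ↑cn).toNat = cs - cn from by omega,
      show cn - cs = 0 from by omega, show cw - ce = 0 from by omega]
  · simp [show ((cw:Int) - ↑ce).toNat = cw - ce from by omega,
      show ((cn:Int) - ↑cs).toNat = cn - cs from by omega,
      show cs - cn = 0 from by omega, show ce - cw = 0 from by omega]
  · simp [show ((cw:Int) - ↑ce).toNat = cw - ce from by omega,
      show ((cs:Int) - ↑cn).toNat = cs - cn from by omega,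
      show cn - cs = 0 from by omega, show ce - cw = 0 from by omega]

-- list.remove-pairs loop: membership is preserved downward
theorem pv_cancel_subset (a b : Char) (t : List Char) : ∀ x ∈ pvCancel a b t, x ∈ t := by
  fun_induction pvCancel a b t with
  | case1 t h ih =>
    intro x hx
    exact List.mem_of_mem_erase (List.mem_of_mem_erase (ih x hx))
  | case2 t h => intro x hx; exact hx

-- the counts after the cancellation loop
theorem pv_cancel_count (a b : Char) (hab : a ≠ b) (t : List Char) (x : Char) :
    (pvCancel a b t).count x =
      t.count x - (if x = a ∨ x = b then min (t.count a) (t.count b) else 0) := by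
  fun_induction pvCancel a b t with
  | case1 t h ih =>
    have hca : 0 < t.count a := List.count_pos_iff.mpr h.1
    have hcb : 0 < t.count b := List.count_pos_iff.mpr h.2
    have ea : ((t.erase a).erase b).count a = t.count a - 1 := by
      rw [List.count_erase_of_ne hab, List.count_erase_self]
    have eb : ((t.erase a).erase b).count b = t.count b - 1 := by
      rw [List.count_erase_self, List.count_erase_of_ne (Ne.symm hab)]
    rw [ih]
    by_cases hx : x = a ∨ x = b
    · rcases hx with hx | hx <;> subst hx <;> simp [ea, eb, hab, Ne.symm hab] <;> omega
    · push_neg at hx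
      have ex : ((t.erase a).erase b).count x = t.count x := by
        rw [List.count_erase_of_ne hx.2, List.count_erase_of_ne hx.1]
      simp [hx.1, hx.2, ex]
  | case2 t h =>
    have : t.count a = 0 ∨ t.count b = 0 := by
      rcases not_and_or.mp h with h' | h' <;>
        [left; right] <;> simpa [List.count_eq_zero] using h'
    by_cases hx : x = a ∨ x = b <;> simp [hx] <;> omega

-- inserting past a block it does not go before
theorem pv_insert_skip (bef : Char → Char → Bool) (x y : Char) (h : bef x y = false) :
    ∀ (k : Nat) (rest : List Char),
      PySem.List.insertBy bef x (List.replicate k y ++ rest) =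
        List.replicate k y ++ PySem.List.insertBy bef x rest := by
  intro k
  induction k with
  | zero => simp
  | succ m ih => intro rest; simp [List.replicate_succ, PySem.List.insertBy, h, ih]

-- inserting before everything
theorem pv_insert_front (bef : Char → Char → Bool) (x : Char) (R : List Char)
    (h : ∀ y ∈ R, bef x y = true) : PySem.List.insertBy bef x R = x :: R := by
  cases R with
  | nil => rfl
  | cons y ys => simp [PySem.List.insertBy, h y (List.mem_cons_self)]

-- one insertion step of the sort bumps the right slot of the canonical form
theorem pv_insert_canon (x : Char) (hx : x = 'e' ∨ x = 's' ∨ x = 'w' ∨ x = 'n')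
    (ne ns nw nn : Nat) :
    PySem.List.insertBy (fun a b => decide (pvKey a < pvKey b)) x (pvCanon ne ns nw nn) =
      pvCanon (ne + if x = 'e' then 1 else 0) (ns + if x = 's' then 1 else 0)
              (nw + if x = 'w' then 1 else 0) (nn + if x = 'n' then 1 else 0) := by
  have hskip := pv_insert_skip (fun a b => decide (pvKey a < pvKey b))
  have hfront := pv_insert_front (fun a b => decide (pvKey a < pvKey b))
  rcases hx with hx | hx | hx | hx <;> subst hx <;>
    unfold pvCanon <;> simp only [List.append_assoc]
  · rw [hskip 'e' 'e' (by decide), hfront 'e' _ (by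
      intro y hy
      simp only [List.mem_append, List.mem_replicate] at hy
      rcases hy with ⟨_, rfl⟩ | ⟨_, rfl⟩ | ⟨_, rfl⟩ <;> decide)]
    simp [List.replicate_succ', List.append_assoc]
  · rw [hskip 's' 'e' (by decide), hskip 's' 's' (by decide), hfront 's' _ (by
      intro y hy
      simp only [List.mem_append, List.mem_replicate] at hy
      rcases hy with ⟨_, rfl⟩ | ⟨_, rfl⟩ <;> decide)]
    simp [List.replicate_succ', List.append_assoc]
  · rw [hskip 'w' 'e' (by decide), hskip 'w' 's' (by decide), hskip 'w' 'w' (by decide),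
      hfront 'w' _ (by
        intro y hy
        simp only [List.mem_replicate] at hy
        rcases hy with ⟨_, rfl⟩; decide)]
    simp [List.replicate_succ', List.append_assoc]
  · rw [hskip 'n' 'e' (by decide), hskip 'n' 's' (by decide), hskip 'n' 'w' (by decide),
      show (List.replicate nn 'n' : List Char) = List.replicate nn 'n' ++ [] from
        (List.append_nil _).symm,
      hskip 'n' 'n' (by decide)]
    simp [PySem.List.insertBy, List.replicate_succ']

-- the whole insertion sort of an e/s/w/n list is the canonical string of its counts
theorem pv_sort_canon (l : List Char) (hl : ∀ c ∈ l, c = 'e' ∨ c = 's' ∨ c = 'w' ∨ c = 'n') :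
    PySem.List.sorted l pvKey false =
      pvCanon (l.count 'e') (l.count 's') (l.count 'w') (l.count 'n') := by
  rw [PySem.List.sorted_eq_foldl_insertBy]
  have main : ∀ (l : List Char), (∀ c ∈ l, c = 'e' ∨ c = 's' ∨ c = 'w' ∨ c = 'n') →
      ∀ (ne ns nw nn : Nat),
      l.foldl (fun acc x => PySem.List.insertBy (fun a b => decide (pvKey a < pvKey b)) x acc)
          (pvCanon ne ns nw nn) =
        pvCanon (ne + l.count 'e') (ns + l.count 's') (nw + l.count 'w') (nn + l.count 'n') := by
    intro l
    induction l with
    | nil => intro _ ne ns nw nn; simp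
    | cons x t ih =>
      intro h ne ns nw nn
      simp only [List.foldl_cons, pv_insert_canon x (h x List.mem_cons_self)]
      rw [ih (fun c hc => h c (List.mem_cons_of_mem x hc))]
      simp only [List.count_cons]
      congr 1 <;> [skip; skip; skip; skip] <;>
        rcases h x List.mem_cons_self with hx | hx | hx | hx <;> subst hx <;> simp <;> omega
  have := main l hl 0 0 0 0
  simpa using this

-- a filtered character is one of e, s, w, n
theorem pv_mem_filter (c : Char) (h : PySem.Chars.isIn [c] ['e', 's', 'w', 'n'] = true) :
    c = 'e' ∨ c = 's' ∨ c = 'w' ∨ c = 'n' := by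
  rw [PySem.Chars.isIn_iff_infix] at h
  simpa using h.mem (List.mem_singleton.mpr rfl)

-- one neighbour: A's normalize of the shifted counts is B's filter-cancel-sort of the
-- concatenated move string
theorem pv_step (L step : List Char) :
    pvNormalize ⟨((L.count 'e' + step.count 'e' : Nat) : Int),
                 ((L.count 'w' + step.count 'w' : Nat) : Int),
                 ((L.count 'n' + step.count 'n' : Nat) : Int),
                 ((L.count 's' + step.count 's' : Nat) : Int)⟩ =
      String.ofList (PySem.List.sorted
        (pvCancel 'n' 's' (pvCancel 'e' 'w'
          ((L ++ step).filter (fun c => PySem.Chars.isIn [c] ['e', 's', 'w', 'n'])))) pvKey false) := by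
  set F := (L ++ step).filter (fun c => PySem.Chars.isIn [c] ['e', 's', 'w', 'n']) with hF
  have hFc : ∀ c, PySem.Chars.isIn [c] ['e', 's', 'w', 'n'] = true →
      F.count c = L.count c + step.count c := by
    intro c hc
    rw [hF, List.count_filter (p := fun x => PySem.Chars.isIn [x] ['e', 's', 'w', 'n']) hc,
      List.count_append]
  have hFe := hFc 'e' (by decide)
  have hFs := hFc 's' (by decide)
  have hFw := hFc 'w' (by decide)
  have hFn := hFc 'n' (by decide)
  have hmem : ∀ c ∈ pvCancel 'n' 's' (pvCancel 'e' 'w' F),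
      c = 'e' ∨ c = 's' ∨ c = 'w' ∨ c = 'n' := by
    intro c hc
    have h1 := pv_cancel_subset 'e' 'w' F c (pv_cancel_subset 'n' 's' _ c hc)
    exact pv_mem_filter c (List.mem_filter.mp h1).2
  rw [pv_sort_canon _ hmem]
  have c1 := fun x => pv_cancel_count 'e' 'w' (by decide) F x
  have c2 := fun x => pv_cancel_count 'n' 's' (by decide) (pvCancel 'e' 'w' F) x
  rw [pv_norm_canon]
  have e2 : (pvCancel 'n' 's' (pvCancel 'e' 'w' F)).count 'e' =
      (L.count 'e' + step.count 'e') - (L.count 'w' + step.count 'w') := by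
    rw [c2 'e', c1 'e', c1 'n', c1 's']
    simp only [hFe, hFw, hFn, hFs]
    simp; omega
  have w2 : (pvCancel 'n' 's' (pvCancel 'e' 'w' F)).count 'w' =
      (L.count 'w' + step.count 'w') - (L.count 'e' + step.count 'e') := by
    rw [c2 'w', c1 'w', c1 'n', c1 's']
    simp only [hFe, hFw, hFn, hFs]
    simp; omega
  have n2 : (pvCancel 'n' 's' (pvCancel 'e' 'w' F)).count 'n' =
      (L.count 'n' + step.count 'n') - (L.count 's' + step.count 's') := by
    rw [c2 'n', c1 'n', c1 's']
    simp only [hFn, hFs]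
    simp; omega
  have s2 : (pvCancel 'n' 's' (pvCancel 'e' 'w' F)).count 's' =
      (L.count 's' + step.count 's') - (L.count 'n' + step.count 'n') := by
    rw [c2 's', c1 'n', c1 's']
    simp only [hFn, hFs]
    simp; omega
  rw [e2, s2, w2, n2]

-- ===== VERDICT (by name: the statement is the Claim_ definition above) =====
theorem getNormAdjacentTiles_spec : Claim_equal_getNormAdjacentTiles := by
  intro s _
  show getNormAdjacentTiles s = getNormAdjacentTiles_alt s
  unfold getNormAdjacentTiles getNormAdjacentTiles_alt pvGetDirCounts
  simp only [List.map, List.foldl, PySem.Str.count_eq,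
    show ("e" : String).toList = ['e'] from rfl, show ("s" : String).toList = ['s'] from rfl,
    show ("w" : String).toList = ['w'] from rfl, show ("n" : String).toList = ['n'] from rfl,
    show ("ee" : String).toList = ['e', 'e'] from rfl,
    show ("ess" : String).toList = ['e', 's', 's'] from rfl,
    show ("wss" : String).toList = ['w', 's', 's'] from rfl,
    show ("ww" : String).toList = ['w', 'w'] from rfl,
    show ("wnn" : String).toList = ['w', 'n', 'n'] from rfl,
    show ("enn" : String).toList = ['e', 'n', 'n'] from rfl,
    pv_count_single]
  have k0 := pv_step s.toList ['e', 'e']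
  have k1 := pv_step s.toList ['e', 's', 's']
  have k2 := pv_step s.toList ['w', 's', 's']
  have k3 := pv_step s.toList ['w', 'w']
  have k4 := pv_step s.toList ['w', 'n', 'n']
  have k5 := pv_step s.toList ['e', 'n', 'n']
  norm_num [List.count_cons, List.count_nil, -List.filter_append] at k0 k1 k2 k3 k4 k5
  rw [k0, k1, k2, k3, k4, k5]
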